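-- pv_equiv track=rewrite | github.com/keithrozario/Klayers | packages/spacy/latest/Klayers-python37-spacy/python/plac_ext.py | _parse_doctest
-- ===== SOURCE A (Python) =====
-- def _parse_doctest(lineiter):
--     "Returns the lines of input, the lines of output, and the line number"
--     lines = [line.strip() for line in lineiter]
--     inputs = []
--     positions = []
--     for i, line in enumerate(lines):
--         if line.startswith('i> '):
--             inputs.append(line[3:])
--             positions.append(i)
--     positions.append(len(lines) + 1)  # last position
--     outputs = []
--     for i, start in enumerate(positions[:-1]):
--         end = positions[i + 1]
--         outputs.append('\n'.join(lines[start+1:end]))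
--     return zip(inputs, outputs, positions)
-- ===== SOURCE B (Python) =====
-- def _parse_doctest(lineiter):
--     "Returns the lines of input, the lines of output, and the line number"
--     inputs, positions, outputs = [], [], []
--     current = None
--     for i, line in enumerate(lineiter):
--         line = line.strip()
--         if line.startswith('i> '):
--             inputs.append(line[3:])
--             positions.append(i)
--             current = []
--             outputs.append(current)
--         elif current is not None:
--             current.append(line)
--     return zip(inputs, ('\n'.join(o) for o in outputs), positions)
-- ===== Notes on version B (the rewrite author's own statement) =====
-- stated objective: simpler
-- what changed: Replaced A's two-phase design (collect marker positions, append a sentinel, then re-slice the line list between consecutive positions and join) by a single streaming pass that appends each non-marker line to the current output buffer, so the sentinel, the position slicing and the second indexed loop disappear.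
import Mathlib
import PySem

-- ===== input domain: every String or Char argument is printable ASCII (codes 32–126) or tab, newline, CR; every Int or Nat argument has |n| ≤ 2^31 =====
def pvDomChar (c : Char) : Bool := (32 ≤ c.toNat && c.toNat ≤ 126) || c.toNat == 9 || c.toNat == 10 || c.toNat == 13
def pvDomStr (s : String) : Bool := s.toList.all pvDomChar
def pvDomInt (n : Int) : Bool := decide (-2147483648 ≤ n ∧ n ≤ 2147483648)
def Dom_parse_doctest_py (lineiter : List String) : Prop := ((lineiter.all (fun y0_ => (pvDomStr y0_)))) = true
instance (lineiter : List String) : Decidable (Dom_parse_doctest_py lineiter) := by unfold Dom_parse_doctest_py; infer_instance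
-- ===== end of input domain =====

-- B replaces A's positions-with-sentinel-then-slice two-phase structure by one streaming
-- pass that appends each non-marker line to the current output buffer (objective: simpler).

-- ===== PORT A =====
def parse_doctest_py (lineiter : List String) : List (String × String × Int) :=
  let lines := lineiter.map PySem.Str.strip
  -- for i, line in enumerate(lines): if line.startswith('i> '): inputs.append(line[3:]); positions.append(i)
  let ip := (PySem.List.enumerate lines 0).foldl
      (fun (s : List String × List Int) (p : Int × String) =>
        if PySem.Str.startswith p.2 "i> " then
          (s.1 ++ [PySem.Str.slice p.2 (some 3) none], s.2 ++ [p.1])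
        else s) ([], [])
  let positions := ip.2 ++ [(lines.length : Int) + 1]   -- last position
  -- for i, start in enumerate(positions[:-1]): end = positions[i+1]; outputs.append('\n'.join(lines[start+1:end]))
  -- positions[i+1] is always in range; pyGetD with (unreachable) default 0 is exact here
  let outputs := (PySem.List.enumerate (PySem.List.slice positions none (some (-1))) 0).foldl
      (fun (outs : List String) (p : Int × Int) =>
        outs ++ [PySem.Str.join "\n"
          (PySem.List.slice lines (some (p.2 + 1)) (some (PySem.List.pyGetD positions (p.1 + 1) 0)))]) []
  ip.1.zip (outputs.zip positions)

-- ===== PORT B =====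
-- 'current' output buffer = last element of the buffer list; on [] ('current is None') appending is a no-op
def pvAppendLast (bufs : List (List String)) (x : String) : List (List String) :=
  match bufs with
  | [] => []
  | [b] => [b ++ [x]]
  | b :: rest => b :: pvAppendLast rest x

def parse_doctest_py_alt (lineiter : List String) : List (String × String × Int) :=
  let st := (PySem.List.enumerate lineiter 0).foldl
      (fun (s : List String × List Int × List (List String)) (p : Int × String) =>
        let line := PySem.Str.strip p.2
        if PySem.Str.startswith line "i> " then
          (s.1 ++ [PySem.Str.slice line (some 3) none], s.2.1 ++ [p.1], s.2.2 ++ [[]])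
        else
          (s.1, s.2.1, pvAppendLast s.2.2 line)) ([], [], [])
  st.1.zip ((st.2.2.map (PySem.Str.join "\n")).zip st.2.1)

-- ===== PRECONDITION & SPEC =====
def Spec_parse_doctest_py (lineiter : List String) (out : List (String × String × Int)) : Prop := out = parse_doctest_py_alt lineiter
instance (lineiter : List String) (out : List (String × String × Int)) : Decidable (Spec_parse_doctest_py lineiter out) := by unfold Spec_parse_doctest_py; infer_instance

-- ===== CLAIM (what is proved, stated in full; the proofs are below) =====
def Claim_equal_parse_doctest_py : Prop := ∀ (lineiter : List String), Dom_parse_doctest_py lineiter → Spec_parse_doctest_py lineiter (parse_doctest_py lineiter)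

-- ===== LEMMAS AND PROOFS =====

def pvMarker (l : String) : Bool := PySem.Str.startswith l "i> "

def pvPairs (P : List Int) (t : Int) : List (Int × Int) := P.zip (P.tail ++ [t])

def pvPos (ls : List String) : List Int :=
  ((PySem.List.enumerate (ls.map PySem.Str.strip) 0).filter (fun p => pvMarker p.2)).map (fun p => p.1)

def pvStep (bufs : List (List String)) (l : String) : List (List String) :=
  if pvMarker l then bufs ++ [[]] else pvAppendLast bufs l

def pvBufs (ls : List String) : List (List String) := (ls.map PySem.Str.strip).foldl pvStep []

def pvSegs (ls : List String) : List (List String) :=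
  (pvPairs (pvPos ls) ((ls.length : Int) + 1)).map
    (fun p => PySem.List.slice (ls.map PySem.Str.strip) (some (p.1 + 1)) (some p.2))

theorem pv_enum_map (f : String → String) (ls : List String) (s : Int) :
    PySem.List.enumerate (ls.map f) s = (PySem.List.enumerate ls s).map (fun p => (p.1, f p.2)) := by
  induction ls generalizing s with
  | nil => rfl
  | cons x xs ih => simp [PySem.List.enumerate_cons, ih]

theorem pv_appendLast_concat (bs : List (List String)) (b : List String) (x : String) :
    pvAppendLast (bs ++ [b]) x = bs ++ [b ++ [x]] := by
  induction bs with
  | nil => rfl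
  | cons a bs ih =>
    cases bs with
    | nil => rfl
    | cons c cs => simpa [pvAppendLast] using ih

theorem pv_pairs_concat (P : List Int) (a b : Int) :
    pvPairs (P ++ [a]) b = pvPairs P a ++ [(a, b)] := by
  induction P with
  | nil => rfl
  | cons x P ih =>
    cases P with
    | nil => rfl
    | cons y Q => simpa [pvPairs] using ih

theorem pv_pairs_len (P : List Int) (t : Int) : (pvPairs P t).length = P.length := by
  cases P with
  | nil => rfl
  | cons x P => simp [pvPairs]

theorem pv_slice_append {α : Type} (xs ys : List α) (a b : Int) (ha : 0 ≤ a) (hb : 0 ≤ b)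
    (hble : b ≤ (xs.length : Int)) :
    PySem.List.slice (xs ++ ys) (some a) (some b) = PySem.List.slice xs (some a) (some b) := by
  rw [PySem.List.slice_toNat _ ha hb, PySem.List.slice_toNat _ ha hb]
  by_cases h : a.toNat ≤ xs.length
  · have hlen : b.toNat - a.toNat ≤ (List.drop a.toNat xs).length := by
      rw [List.length_drop]; omega
    rw [List.drop_append_of_le_length h, List.take_append_of_le_length hlen]
  · have h1 : b.toNat - a.toNat = 0 := by omega
    simp [h1]

theorem pv_slice_drop {α : Type} (xs : List α) (a b : Int) (ha : 0 ≤ a)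
    (hb : (xs.length : Int) ≤ b) :
    PySem.List.slice xs (some a) (some b) = xs.drop a.toNat := by
  rw [PySem.List.slice_toNat _ ha (by omega)]
  exact List.take_of_length_le (by simp; omega)

theorem pv_pos_append (ls : List String) (l : String) :
    pvPos (ls ++ [l]) = pvPos ls ++ (if pvMarker (PySem.Str.strip l) then [(ls.length : Int)] else []) := by
  unfold pvPos
  rw [List.map_append, PySem.List.enumerate_append, List.filter_append, List.map_append]
  simp only [List.map_cons, List.map_nil, PySem.List.enumerate_cons, PySem.List.enumerate_nil]
  by_cases h : pvMarker (PySem.Str.strip l) <;> simp [h]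

theorem pv_pos_bound (ls : List String) (q : Int) (hq : q ∈ pvPos ls) :
    0 ≤ q ∧ q < (ls.length : Int) := by
  unfold pvPos at hq
  obtain ⟨p, hp, rfl⟩ := List.mem_map.1 hq
  have hp' := (List.mem_filter.1 hp).1
  rw [PySem.List.mem_enumerate_iff] at hp'
  obtain ⟨k, hk, rfl⟩ := hp'
  simp at hk ⊢
  omega

theorem pv_bufs_append (ls : List String) (l : String) :
    pvBufs (ls ++ [l]) = pvStep (pvBufs ls) (PySem.Str.strip l) := by
  unfold pvBufs
  rw [List.map_append, List.foldl_append]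
  rfl

theorem pv_adj {α : Type} (P : List Int) (t : Int) (G : Int → Int → α) :
    (PySem.List.enumerate P 0).map (fun p => G p.2 (PySem.List.pyGetD (P ++ [t]) (p.1 + 1) 0))
    = (pvPairs P t).map (fun p => G p.1 p.2) := by
  apply List.ext_getElem
  · simp [PySem.List.length_enumerate, pv_pairs_len]
  · intro k h1 h2
    simp only [List.getElem_map]
    rw [PySem.List.getElem_enumerate]
    have hk : k < P.length := by simpa [PySem.List.length_enumerate] using h1
    have hcast : (0 : Int) + (k : Int) + 1 = ((k + 1 : Nat) : Int) := by push_cast; ring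
    rw [hcast, PySem.List.pyGetD_natCast, List.getD_eq_getElem _ _ (by simp; omega)]
    have hzip : (pvPairs P t)[k]'(by rw [pv_pairs_len]; exact hk)
        = (P[k]'hk, (P.tail ++ [t])[k]'(by simp; omega)) := by
      simp only [pvPairs]
      rw [List.getElem_zip]
    rw [hzip]
    by_cases h : k + 1 < P.length
    · rw [List.getElem_append_left (by omega), List.getElem_append_left (by simp; omega),
        List.getElem_tail]
    · rw [List.getElem_append_right (by omega), List.getElem_append_right (by simp; omega)]
      simp

theorem pv_front_congr (ls : List String) (ext : List String) (Q : List Int) (q : Int)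
    (hb : ∀ e ∈ Q ++ [q], 0 ≤ e ∧ e < (ls.length : Int)) :
    (pvPairs Q q).map (fun p =>
        PySem.List.slice (ls.map PySem.Str.strip ++ ext) (some (p.1 + 1)) (some p.2))
    = (pvPairs Q q).map (fun p =>
        PySem.List.slice (ls.map PySem.Str.strip) (some (p.1 + 1)) (some p.2)) := by
  apply List.map_congr_left
  rintro ⟨p, e⟩ hpr
  have hmem := List.of_mem_zip hpr
  have hp : p ∈ Q ++ [q] := List.mem_append_left _ hmem.1
  have he : e ∈ Q ++ [q] := by
    rcases List.mem_append.1 hmem.2 with h | h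
    · exact List.mem_append_left _ (List.mem_of_mem_tail h)
    · exact List.mem_append_right _ h
  obtain ⟨hp0, _⟩ := hb p hp
  obtain ⟨he0, he1⟩ := hb e he
  have hlenN : (ls.map PySem.Str.strip).length = ls.length := by simp
  exact pv_slice_append _ ext (p + 1) e (by omega) he0 (by omega)

set_option maxHeartbeats 1000000 in
theorem pv_seg (ls : List String) : pvSegs ls = pvBufs ls := by
  induction ls using List.reverseRecOn with
  | nil => rfl
  | append_singleton ls l ih =>
    have hlenL : ((ls.map PySem.Str.strip).length : Int) = (ls.length : Int) := by simp
    have hlenL' : (((ls ++ [l]).map PySem.Str.strip).length : Int) = (ls.length : Int) + 1 := by simp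
    have hmapL : (ls ++ [l]).map PySem.Str.strip
        = ls.map PySem.Str.strip ++ [PySem.Str.strip l] := by simp
    have hsent : (((ls ++ [l]).length : Int)) + 1 = ((ls.length : Int)) + 2 := by simp; ring
    have hlenN : (ls.map PySem.Str.strip).length = ls.length := by simp
    have hlenN' : (ls.map PySem.Str.strip ++ [PySem.Str.strip l]).length = ls.length + 1 := by simp
    rw [pv_bufs_append, ← ih]
    unfold pvSegs pvStep
    rw [pv_pos_append, hsent, hmapL]
    by_cases hm : pvMarker (PySem.Str.strip l)
    · -- marker: a new empty buffer is appended
      rw [if_pos hm, if_pos hm, pv_pairs_concat]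
      rw [List.map_append]
      congr 1
      · -- front part equals pvSegs ls
        rcases List.eq_nil_or_concat (pvPos ls) with hP | ⟨Q, q, hP⟩
        · simp [hP, pvPairs]
        rw [List.concat_eq_append] at hP
        have hb : ∀ e ∈ Q ++ [q], 0 ≤ e ∧ e < (ls.length : Int) := by
          intro e he; exact pv_pos_bound ls e (hP ▸ he)
        obtain ⟨hq0, hq1⟩ := hb q (List.mem_append_right _ (List.mem_singleton_self q))
        rw [hP, pv_pairs_concat, pv_pairs_concat, List.map_append, List.map_append]
        congr 1
        · exact pv_front_congr ls [PySem.Str.strip l] Q q hb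
        · simp only [List.map_cons, List.map_nil]
          congr 1
          rw [pv_slice_append _ _ _ _ (by omega) (by omega) (by omega),
            pv_slice_drop _ _ _ (by omega) (by omega),
            pv_slice_drop _ _ _ (by omega) (by omega)]
      · -- new last element is the empty buffer
        simp only [List.map_cons, List.map_nil]
        congr 1
        rw [pv_slice_drop _ _ _ (by omega) (by omega)]
        apply List.drop_eq_nil_of_le
        omega
    · -- non-marker: the stripped line goes to the current buffer
      rw [if_neg hm, if_neg hm, List.append_nil]
      rcases List.eq_nil_or_concat (pvPos ls) with hP | ⟨Q, q, hP⟩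
      · simp [hP, pvPairs, pvAppendLast]
      rw [List.concat_eq_append] at hP
      have hb : ∀ e ∈ Q ++ [q], 0 ≤ e ∧ e < (ls.length : Int) := by
        intro e he; exact pv_pos_bound ls e (hP ▸ he)
      obtain ⟨hq0, hq1⟩ := hb q (List.mem_append_right _ (List.mem_singleton_self q))
      rw [hP, pv_pairs_concat, pv_pairs_concat, List.map_append, List.map_append]
      simp only [List.map_cons, List.map_nil]
      rw [pv_appendLast_concat]
      congr 1
      · exact pv_front_congr ls [PySem.Str.strip l] Q q hb
      · congr 1
        rw [pv_slice_drop _ _ _ (by omega) (by omega),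
          pv_slice_drop _ _ _ (by omega) (by omega)]
        rw [List.drop_append_of_le_length (by omega)]

theorem pv_zip_trunc {α β : Type} (l : List α) (l' ys : List β) (h : l.length ≤ l'.length) :
    l.zip (l' ++ ys) = l.zip l' := by
  induction l generalizing l' with
  | nil => simp
  | cons x l ih =>
    cases l' with
    | nil => simp at h
    | cons y l' => simp only [List.cons_append, List.zip_cons_cons]; rw [ih l' (by simpa using h)]

theorem pv_enum_foldl_snd {β : Type} (ls : List String) (g : β → String → β) (s : Int) (b0 : β) :
    (PySem.List.enumerate ls s).foldl (fun b p => g b p.2) b0 = ls.foldl g b0 := by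
  induction ls generalizing s b0 with
  | nil => rfl
  | cons x xs ih => simp only [PySem.List.enumerate_cons, List.foldl_cons]; exact ih _ _

theorem pv_foldA (es : List (Int × String)) (I : List String) (P : List Int) :
    es.foldl (fun (s : List String × List Int) (p : Int × String) =>
      if PySem.Str.startswith p.2 "i> " then
        (s.1 ++ [PySem.Str.slice p.2 (some 3) none], s.2 ++ [p.1]) else s) (I, P)
    = (es.foldl (fun a p => if PySem.Str.startswith p.2 "i> " then
          a ++ [PySem.Str.slice p.2 (some 3) none] else a) I,
       es.foldl (fun a p => if PySem.Str.startswith p.2 "i> " then a ++ [p.1] else a) P) := by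
  induction es generalizing I P with
  | nil => rfl
  | cons e es ih =>
    simp only [List.foldl_cons]
    cases h : PySem.Str.startswith e.2 "i> " <;> simp only [if_pos, Bool.false_eq_true,
      reduceIte] <;> rw [ih]

theorem pv_foldB (es : List (Int × String)) (I : List String) (P : List Int)
    (Bf : List (List String)) :
    es.foldl (fun (s : List String × List Int × List (List String)) (p : Int × String) =>
      if PySem.Str.startswith (PySem.Str.strip p.2) "i> " then
        (s.1 ++ [PySem.Str.slice (PySem.Str.strip p.2) (some 3) none], s.2.1 ++ [p.1], s.2.2 ++ [[]])
      else (s.1, s.2.1, pvAppendLast s.2.2 (PySem.Str.strip p.2))) (I, P, Bf)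
    = (es.foldl (fun a p => if PySem.Str.startswith (PySem.Str.strip p.2) "i> " then
          a ++ [PySem.Str.slice (PySem.Str.strip p.2) (some 3) none] else a) I,
       es.foldl (fun a p => if PySem.Str.startswith (PySem.Str.strip p.2) "i> " then
          a ++ [p.1] else a) P,
       es.foldl (fun b p => pvStep b (PySem.Str.strip p.2)) Bf) := by
  induction es generalizing I P Bf with
  | nil => rfl
  | cons e es ih =>
    simp only [List.foldl_cons]
    rcases Bool.eq_false_or_eq_true (PySem.Str.startswith (PySem.Str.strip e.2) "i> ") with h | h <;>
      simp only [h, Bool.false_eq_true, reduceIte] <;> rw [ih] <;>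
      simp only [pvStep, pvMarker, h, Bool.false_eq_true, reduceIte]

theorem pv_posA (ls : List String) :
    (PySem.List.enumerate (ls.map PySem.Str.strip) 0).foldl
      (fun a p => if PySem.Str.startswith p.2 "i> " then a ++ [p.1] else a) [] = pvPos ls := by
  rw [PySem.List.foldl_append_if (fun (p : Int × String) => PySem.Str.startswith p.2 "i> ")
      (fun (p : Int × String) => p.1)]
  rfl

theorem pv_bufs_len (ls : List String) : (pvBufs ls).length = (pvPos ls).length := by
  rw [← pv_seg]
  simp [pvSegs, pv_pairs_len]

theorem pv_inputsA (ls : List String) :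
    (PySem.List.enumerate (ls.map PySem.Str.strip) 0).foldl
      (fun a p => if PySem.Str.startswith p.2 "i> " then
        a ++ [PySem.Str.slice p.2 (some 3) none] else a) []
    = (PySem.List.enumerate ls 0).foldl
      (fun a p => if PySem.Str.startswith (PySem.Str.strip p.2) "i> " then
        a ++ [PySem.Str.slice (PySem.Str.strip p.2) (some 3) none] else a) [] := by
  rw [pv_enum_map, List.foldl_map]

theorem pv_posB (ls : List String) :
    (PySem.List.enumerate ls 0).foldl
      (fun a p => if PySem.Str.startswith (PySem.Str.strip p.2) "i> " then a ++ [p.1] else a) []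
    = pvPos ls := by
  rw [← pv_posA, pv_enum_map, List.foldl_map]

theorem pv_bufsB (ls : List String) :
    (PySem.List.enumerate ls 0).foldl (fun b p => pvStep b (PySem.Str.strip p.2)) [] = pvBufs ls := by
  rw [pv_enum_foldl_snd ls (fun b x => pvStep b (PySem.Str.strip x)) 0 []]
  unfold pvBufs
  rw [List.foldl_map]

theorem pv_outputs (ls : List String) :
    (pvPairs (pvPos ls) ((ls.length : Int) + 1)).map (fun p =>
      PySem.Str.join "\n" (PySem.List.slice (ls.map PySem.Str.strip) (some (p.1 + 1)) (some p.2)))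
    = (pvBufs ls).map (PySem.Str.join "\n") := by
  rw [← pv_seg]
  unfold pvSegs
  rw [List.map_map]
  rfl

theorem pv_main (ls : List String) : parse_doctest_py ls = parse_doctest_py_alt ls := by
  simp only [parse_doctest_py, parse_doctest_py_alt]
  rw [pv_foldA, pv_foldB]
  simp only [pv_inputsA, pv_posA, pv_posB, pv_bufsB, List.length_map]
  rw [PySem.List.slice_to_neg_one, List.dropLast_concat]
  rw [PySem.List.foldl_append_singleton_eq_map (fun (p : Int × Int) =>
    PySem.Str.join "\n" (PySem.List.slice (ls.map PySem.Str.strip) (some (p.2 + 1))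
      (some (PySem.List.pyGetD (pvPos ls ++ [(ls.length : Int) + 1]) (p.1 + 1) 0))))]
  rw [List.nil_append]
  rw [pv_adj (pvPos ls) ((ls.length : Int) + 1) (fun q e =>
    PySem.Str.join "\n" (PySem.List.slice (ls.map PySem.Str.strip) (some (q + 1)) (some e)))]
  rw [pv_outputs]
  rw [pv_zip_trunc _ _ _ (by rw [List.length_map, pv_bufs_len])]
-- ===== VERDICT (by name: the statement is the Claim_ definition above) =====
theorem parse_doctest_py_spec : Claim_equal_parse_doctest_py := by
  intro ls _
  exact (pv_main ls)
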